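-- pv_equiv track=rewrite | github.com/gargsrishti625-coder/MutualFund_RAG_Chatbot | ingestion/scraper/phase_1_3_1_normalizer.py | _indian_commas
-- ===== SOURCE A (Python) =====
-- def _indian_commas(integer_str: str) -> str:
--     """
--     Add Indian-style thousands separators.
--     e.g. "85357" → "85,357"   "1234567" → "12,34,567"
--     """
--     s = integer_str.lstrip("0") or "0"
--     if len(s) <= 3:
--         return s
--     # Last 3 digits always grouped
--     result = s[-3:]
--     s = s[:-3]
--     while s:
--         result = s[-2:] + "," + result
--         s = s[:-2]
--     return result
-- ===== SOURCE B (Python) =====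
-- def _indian_commas(integer_str: str) -> str:
--     """
--     Add Indian-style thousands separators.
--     Walks the string left-to-right, cutting off each head group (size 1 or 2,
--     determined by the parity of what remains before the final trio), then joins
--     the groups with commas.
--     """
--     s = integer_str.lstrip("0") or "0"
--     n = len(s)
--     parts = []
--     i = 0
--     while n - i > 3:
--         h = 1 if (n - i - 3) % 2 == 1 else 2
--         parts.append(s[i:i + h])
--         i += h
--     parts.append(s[i:])
--     return ",".join(parts)
-- ===== Notes on version B (the rewrite author's own statement) =====
-- stated objective: faster
-- what changed: Replaces the right-to-left while-loop that slices two characters off the tail and prepends them onto the growing result string with a left-to-right index walk that collects the parity-sized head groups into a list and joins them with commas once.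
import Mathlib
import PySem

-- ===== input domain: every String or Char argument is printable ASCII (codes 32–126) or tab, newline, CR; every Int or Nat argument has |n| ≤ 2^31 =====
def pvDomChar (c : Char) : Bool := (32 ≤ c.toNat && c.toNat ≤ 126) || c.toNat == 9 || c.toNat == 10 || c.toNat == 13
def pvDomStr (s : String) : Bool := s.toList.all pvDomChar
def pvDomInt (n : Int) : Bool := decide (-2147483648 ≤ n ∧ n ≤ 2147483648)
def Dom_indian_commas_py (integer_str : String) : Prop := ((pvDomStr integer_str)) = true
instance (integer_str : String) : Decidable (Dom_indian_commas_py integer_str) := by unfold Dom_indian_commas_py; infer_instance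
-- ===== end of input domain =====

-- B walks the string left-to-right collecting parity-sized groups and joins them once,
-- instead of A's right-to-left tail-slice loop that prepends onto the result string.


-- ===== PORT A =====
-- while s: result = s[-2:] + "," + result; s = s[:-2]
-- s[-2:] = drop (len-2), s[:-2] = take (len-2) (Nat subtraction clamps at 0 exactly as
-- Python's negative-slice clamping does for len < 2).
def indianLoopA (s result : List Char) : List Char :=
  if s = [] then result
  else indianLoopA (s.take (s.length - 2)) (s.drop (s.length - 2) ++ ',' :: result)
termination_by s.length
decreasing_by
  have : s.length ≠ 0 := by simpa [List.length_eq_zero_iff] using ‹¬ s = []›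
  simp [List.length_take]; omega

def indian_commas_py (integer_str : String) : String :=
  -- s = integer_str.lstrip("0") or "0"  (lstrip with the char set {'0'} = dropWhile; exact)
  let s0 := integer_str.toList.dropWhile (· == '0')
  let s := if s0 = [] then ['0'] else s0
  if s.length ≤ 3 then String.mk s
  else indianLoopA (s.take (s.length - 3)) (s.drop (s.length - 3)) |> String.mk

-- ===== PORT B =====
-- while n - i > 3: h = 1 if (n-i-3)%2==1 else 2; parts.append(s[i:i+h]); i += h
def indianPartsB (s : List Char) (i : Nat) : List (List Char) :=
  if 3 < s.length - i then
    -- s[i:i+h] = (s.drop i).take h (i, h ≥ 0 and i ≤ len here, exactly Python's slice)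
    (s.drop i).take (if (s.length - i - 3) % 2 = 1 then 1 else 2) ::
      indianPartsB s (i + (if (s.length - i - 3) % 2 = 1 then 1 else 2))
  else [s.drop i]
termination_by s.length - i
decreasing_by split <;> omega

def indian_commas_py_alt (integer_str : String) : String :=
  let s0 := integer_str.toList.dropWhile (· == '0')
  let s := if s0 = [] then ['0'] else s0
  String.mk (PySem.Chars.join [','] (indianPartsB s 0))

-- ===== PRECONDITION & SPEC =====
def Spec_indian_commas_py (integer_str : String) (out : String) : Prop := out = indian_commas_py_alt integer_str
instance (integer_str : String) (out : String) : Decidable (Spec_indian_commas_py integer_str out) := by unfold Spec_indian_commas_py; infer_instance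

-- ===== CLAIM (what is proved, stated in full; the proofs are below) =====
def Claim_equal_indian_commas_py : Prop := ∀ (integer_str : String), Dom_indian_commas_py integer_str → Spec_indian_commas_py integer_str (indian_commas_py integer_str)

-- ===== LEMMAS AND PROOFS =====

-- B's grouping written as recursion on the remaining suffix (proof-side reformulation
-- of indianPartsB + join).
def pvGoB (s : List Char) : List Char :=
  if s.length ≤ 3 then s
  else
    s.take (if (s.length - 3) % 2 = 1 then 1 else 2) ++
      ',' :: pvGoB (s.drop (if (s.length - 3) % 2 = 1 then 1 else 2))
termination_by s.length
decreasing_by simp [List.length_drop]; split <;> omega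

theorem indianPartsB_ne_nil (s : List Char) (i : Nat) : indianPartsB s i ≠ [] := by
  rw [indianPartsB]; split <;> simp

theorem join_partsB (s : List Char) (i : Nat) (hi : i ≤ s.length) :
    PySem.Chars.join [','] (indianPartsB s i) = pvGoB (s.drop i) := by
  induction hm : s.length - i using Nat.strong_induction_on generalizing i with
  | _ m ih =>
  subst hm
  rw [indianPartsB]
  by_cases hgt : 3 < s.length - i
  · rw [if_pos hgt]
    set h : Nat := if (s.length - i - 3) % 2 = 1 then 1 else 2 with hhdef
    have hh1 : 1 ≤ h := by rw [hhdef]; split <;> omega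
    have hh2 : h ≤ 2 := by rw [hhdef]; split <;> omega
    obtain ⟨b, l, hbl⟩ : ∃ b l, indianPartsB s (i + h) = b :: l := by
      cases hc : indianPartsB s (i + h) with
      | nil => exact absurd hc (indianPartsB_ne_nil s (i + h))
      | cons b l => exact ⟨b, l, rfl⟩
    rw [hbl, PySem.Chars.join_cons_cons, ← hbl,
        ih _ (by omega) _ (by omega) rfl]
    conv_rhs => rw [pvGoB]
    have hlen : (s.drop i).length = s.length - i := by simp
    rw [if_neg (by omega)]
    have hpar : (if ((s.drop i).length - 3) % 2 = 1 then 1 else 2) = h := by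
      rw [hlen, hhdef]
    rw [hpar, List.drop_drop]
    simp
  · rw [if_neg hgt, PySem.Chars.join_singleton]
    rw [pvGoB, if_pos (by simp; omega)]

-- The string A's loop builds, without the accumulator: groups of ≤2 from the right, each
-- followed by a comma.
def pvAstr (s : List Char) : List Char :=
  if s = [] then []
  else pvAstr (s.take (s.length - 2)) ++ s.drop (s.length - 2) ++ [',']
termination_by s.length
decreasing_by
  have : s.length ≠ 0 := by simpa [List.length_eq_zero_iff] using ‹¬ s = []›
  simp [List.length_take]; omega

theorem loopA_eq (s r : List Char) : indianLoopA s r = pvAstr s ++ r := by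
  induction hm : s.length using Nat.strong_induction_on generalizing s r with
  | _ m ih =>
  subst hm
  by_cases h : s = []
  · rw [indianLoopA, if_pos h, pvAstr, if_pos h]; simp
  · have hlt : (s.take (s.length - 2)).length < s.length := by
      have : s.length ≠ 0 := by simpa [List.length_eq_zero_iff] using h
      simp [List.length_take]; omega
    rw [indianLoopA, if_neg h, pvAstr, if_neg h, ih _ hlt _ _ rfl]
    simp

def hOf (m : Nat) : Nat := if m % 2 = 1 then 1 else 2

theorem hOf_sub2 (m : Nat) (h : 2 ≤ m) : hOf (m - 2) = hOf m := by
  unfold hOf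
  have : (m - 2) % 2 = m % 2 := by omega
  rw [this]

-- pvAstr of a length-1 or length-2 list
theorem pvAstr_small (s : List Char) (h1 : s ≠ []) (h2 : s.length ≤ 2) :
    pvAstr s = s ++ [','] := by
  rw [pvAstr, if_neg h1]
  have : s.length - 2 = 0 := by omega
  simp [this, pvAstr]

-- peel the head group off pvAstr
theorem pvAstr_head (s : List Char) (h3 : 3 ≤ s.length) :
    pvAstr s = s.take (hOf s.length) ++ ',' :: pvAstr (s.drop (hOf s.length)) := by
  induction hm : s.length using Nat.strong_induction_on generalizing s with
  | _ m ih =>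
  subst hm
  have hne : s ≠ [] := by intro h; subst h; simp at h3
  have hh : hOf s.length ≤ 2 := by unfold hOf; split <;> omega
  have hh1 : 1 ≤ hOf s.length := by unfold hOf; split <;> omega
  rw [pvAstr, if_neg hne]
  by_cases hm4 : s.length ≤ 4
  · -- s.length = 3 or 4: the left part take (len-2) is a single group of size hOf len
    have hlen : s.length - 2 = hOf s.length := by
      unfold hOf; split <;> omega
    have hne2 : s.take (s.length - 2) ≠ [] := by
      simp [List.length_eq_zero_iff.symm, List.length_take]; omega
    rw [pvAstr_small _ hne2 (by simp [List.length_take]; omega), hlen]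
    have hdrop : pvAstr (s.drop (hOf s.length)) = s.drop (hOf s.length) ++ [','] := by
      apply pvAstr_small
      · simp [List.length_eq_zero_iff.symm, List.length_drop]; omega
      · simp [List.length_drop]; omega
    rw [hdrop]
    simp
  · -- s.length ≥ 5: recurse on the left part take (len-2)
    set h := hOf s.length with hhdef
    have hpar : hOf (s.take (s.length - 2)).length = h := by
      rw [List.length_take, Nat.min_eq_left (by omega), hOf_sub2 _ (by omega), hhdef]
    have hlt : (s.take (s.length - 2)).length < s.length := by
      simp [List.length_take]; omega
    have h3' : 3 ≤ (s.take (s.length - 2)).length := by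
      simp [List.length_take]; omega
    rw [ih _ hlt _ h3' rfl, hpar]
    have htt : (s.take (s.length - 2)).take h = s.take h := by
      rw [List.take_take]; congr 1; omega
    have htd : (s.take (s.length - 2)).drop h = (s.drop h).take (s.length - 2 - h) := by
      rw [List.drop_take]
    rw [htt, htd]
    -- unfold pvAstr at (s.drop h)
    have hne3 : s.drop h ≠ [] := by
      simp [List.length_eq_zero_iff.symm, List.length_drop]; omega
    have hlen3 : (s.drop h).length - 2 = s.length - 2 - h := by
      simp [List.length_drop]; omega
    conv_rhs => rw [pvAstr, if_neg hne3]
    rw [hlen3]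
    have hdd : (s.drop h).drop (s.length - 2 - h) = s.drop (s.length - 2) := by
      rw [List.drop_drop]; congr 1; omega
    rw [hdd]
    simp

-- the bridge: B's recursion on s ++ (3-char tail) equals A's group string ++ tail
theorem goB_eq (s r : List Char) (hs : s ≠ []) (hr : r.length = 3) :
    pvGoB (s ++ r) = pvAstr s ++ r := by
  induction hm : s.length using Nat.strong_induction_on generalizing s with
  | _ m ih =>
  subst hm
  have hs1 : 1 ≤ s.length := by
    cases s with | nil => exact absurd rfl hs | cons a t => simp
  have hgt : ¬ (s ++ r).length ≤ 3 := by simp [List.length_append, hr]; omega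
  rw [pvGoB, if_neg hgt]
  have hpar : (if ((s ++ r).length - 3) % 2 = 1 then 1 else 2) = hOf s.length := by
    simp [List.length_append, hr, hOf]
  rw [hpar]
  have hh1 : 1 ≤ hOf s.length := by unfold hOf; split <;> omega
  have hh2 : hOf s.length ≤ 2 := by unfold hOf; split <;> omega
  by_cases hsm : s.length ≤ 2
  · -- head group is all of s
    have hhm : hOf s.length = s.length := by
      unfold hOf; split <;> omega
    have ht : (s ++ r).take (hOf s.length) = s := by
      rw [List.take_append_of_le_length (by omega), hhm, List.take_length]
    have hd : (s ++ r).drop (hOf s.length) = r := by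
      rw [hhm, List.drop_left]
    have hgor : pvGoB r = r := by rw [pvGoB, if_pos (by omega)]
    rw [ht, hd, hgor, pvAstr_small s hs hsm]
    simp
  · -- head group is a strict prefix; recurse
    have hhlt : hOf s.length ≤ s.length := by omega
    have ht : (s ++ r).take (hOf s.length) = s.take (hOf s.length) :=
      List.take_append_of_le_length hhlt
    have hd : (s ++ r).drop (hOf s.length) = s.drop (hOf s.length) ++ r :=
      List.drop_append_of_le_length hhlt
    have hne : s.drop (hOf s.length) ≠ [] := by
      simp [List.length_eq_zero_iff.symm, List.length_drop]; omega
    have hlt : (s.drop (hOf s.length)).length < s.length := by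
      simp [List.length_drop]; omega
    rw [ht, hd, ih _ hlt _ hne rfl, pvAstr_head s (by omega)]
    simp

-- ===== VERDICT (by name: the statement is the Claim_ definition above) =====
theorem indian_commas_py_spec : Claim_equal_indian_commas_py := by
  intro integer_str _
  unfold Spec_indian_commas_py
  simp only [indian_commas_py, indian_commas_py_alt]
  set s : List Char :=
    if integer_str.toList.dropWhile (· == '0') = [] then ['0']
    else integer_str.toList.dropWhile (· == '0') with hsd
  rw [join_partsB s 0 (by omega), List.drop_zero]
  by_cases hle : s.length ≤ 3
  · rw [if_pos hle, pvGoB, if_pos hle]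
  · rw [if_neg hle]
    have hne : s.take (s.length - 3) ≠ [] := by
      simp [List.length_eq_zero_iff.symm, List.length_take]; omega
    have hr : (s.drop (s.length - 3)).length = 3 := by
      simp [List.length_drop]; omega
    have := goB_eq (s.take (s.length - 3)) (s.drop (s.length - 3)) hne hr
    rw [List.take_append_drop] at this
    rw [loopA_eq, this]
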